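-- pv_equiv track=rewrite | github.com/ckronber/python_files | strings.py | unique_english_letters
-- ===== SOURCE A (Python) =====
-- def unique_english_letters(word):
--   letters = "ABCDEFGHIJKLMNOPQRSTUVWXYZabcdefghijklmnopqrstuvwxyz"
--   new_letters = letters
--   unique = []
--   for let in word:
--       if(let in new_letters):
--           unique.append(new_letters[new_letters.find(let)])
--           new_letters = new_letters.replace(let,'')
--   return len(unique)
-- ===== SOURCE B (Python) =====
-- def unique_english_letters(word):
--     letters = set("ABCDEFGHIJKLMNOPQRSTUVWXYZabcdefghijklmnopqrstuvwxyz")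
--     return len(set(word) & letters)
-- ===== Notes on version B (the rewrite author's own statement) =====
-- stated objective: idiomatic
-- what changed: Replaces A's stateful single pass that shrinks the alphabet string with replace() and appends matches to a list by building set(word) and intersecting it with the fixed 52-letter set.
import Mathlib
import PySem

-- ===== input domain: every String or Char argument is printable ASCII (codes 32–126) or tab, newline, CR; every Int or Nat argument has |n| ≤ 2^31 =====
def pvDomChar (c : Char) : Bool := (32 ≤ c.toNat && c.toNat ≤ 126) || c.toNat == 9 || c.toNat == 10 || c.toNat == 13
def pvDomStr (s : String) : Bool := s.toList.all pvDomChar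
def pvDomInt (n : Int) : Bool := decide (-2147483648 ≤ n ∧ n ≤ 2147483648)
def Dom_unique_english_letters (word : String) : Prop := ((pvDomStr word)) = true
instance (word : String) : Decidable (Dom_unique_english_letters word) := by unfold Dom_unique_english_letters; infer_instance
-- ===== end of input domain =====

-- B replaces A's stateful pass (shrinking alphabet string + appended list) with set(word) ∩ letter-set; objective: idiomatic.

-- ===== PORT A =====
def uelLetters : List Char := "ABCDEFGHIJKLMNOPQRSTUVWXYZabcdefghijklmnopqrstuvwxyz".toList

def uelLoop : List Char → List Char → List Char → List Char
  | [], _nl, uniq => uniq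
  | c :: rest, nl, uniq =>
    if PySem.Chars.isIn [c] nl then
      uelLoop rest (PySem.Chars.replace nl [c] [])
        (uniq ++ [PySem.List.pyGetD nl (PySem.Chars.find nl [c]) c])
    else uelLoop rest nl uniq

def unique_english_letters (word : String) : Int :=
  PySem.List.len (uelLoop word.toList uelLetters [])

-- ===== PORT B =====
def uelAltLetters : PySem.Set Char :=
  PySem.Set.ofList "ABCDEFGHIJKLMNOPQRSTUVWXYZabcdefghijklmnopqrstuvwxyz".toList

def unique_english_letters_alt (word : String) : Int :=
  PySem.Set.len (PySem.Set.inter (PySem.Set.ofList word.toList) uelAltLetters)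

-- ===== PRECONDITION & SPEC =====
def Spec_unique_english_letters (word : String) (out : Int) : Prop := out = unique_english_letters_alt word
instance (word : String) (out : Int) : Decidable (Spec_unique_english_letters word out) := by unfold Spec_unique_english_letters; infer_instance

-- ===== CLAIM (what is proved, stated in full; the proofs are below) =====
def Claim_equal_unique_english_letters : Prop := ∀ (word : String), Dom_unique_english_letters word → Spec_unique_english_letters word (unique_english_letters word)

-- ===== LEMMAS AND PROOFS =====

-- find.go with a singleton needle is first-index search
theorem uel_find_go_mem (c : Char) : ∀ (l : List Char) (k : Nat), c ∈ l →
    PySem.Chars.find.go [c] l k = ((k + l.idxOf c : Nat) : Int)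
  | [], k, h => by simp at h
  | x :: t, k, h => by
    by_cases hc : c = x
    · subst hc
      simp [PySem.Chars.find.go, List.isPrefixOf, List.idxOf_cons_self]
    · have hm : c ∈ t := by
        rcases List.mem_cons.mp h with h' | h' <;> [exact absurd h' hc; exact h']
      have := uel_find_go_mem c t (k + 1) hm
      simp only [PySem.Chars.find.go, List.isPrefixOf]
      have hne : (c == x) = false := by simp [hc]
      simp [hne, this, Ne.symm hc]
      ring

theorem uel_find_go_not_mem (c : Char) : ∀ (l : List Char) (k : Nat), c ∉ l →
    PySem.Chars.find.go [c] l k = -1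
  | [], k, _ => by simp [PySem.Chars.find.go]
  | x :: t, k, h => by
    have hne : (c == x) = false := by
      simp; rintro rfl; exact h (List.mem_cons_self ..)
    have := uel_find_go_not_mem c t (k + 1) (fun hm => h (List.mem_cons_of_mem _ hm))
    simp [PySem.Chars.find.go, List.isPrefixOf, hne, this]

theorem uel_isIn_singleton (c : Char) (l : List Char) :
    PySem.Chars.isIn [c] l = l.contains c := by
  by_cases h : c ∈ l
  · simp [PySem.Chars.isIn, PySem.Chars.find, uel_find_go_mem c l 0 h, h]
  · simp [PySem.Chars.isIn, PySem.Chars.find, uel_find_go_not_mem c l 0 h, h]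

theorem uel_pyGetD_find (c : Char) (l : List Char) (h : c ∈ l) :
    PySem.List.pyGetD l (PySem.Chars.find l [c]) c = c := by
  have hf : PySem.Chars.find l [c] = ((l.idxOf c : Nat) : Int) := by
    simpa using uel_find_go_mem c l 0 h
  rw [hf, PySem.List.pyGetD_natCast]
  have hlt := List.idxOf_lt_length_of_mem h
  rw [List.getD_eq_getElem _ _ hlt]
  exact List.getElem_idxOf hlt

theorem uel_replace_go (c : Char) : ∀ (fuel : Nat) (l acc : List Char), l.length ≤ fuel →
    PySem.Chars.replace.go [c] [] fuel l acc = acc.reverse ++ l.filter (fun x => x != c)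
  | 0, l, acc, h => by
    have : l = [] := List.eq_nil_of_length_eq_zero (Nat.le_zero.mp h)
    subst this; simp [PySem.Chars.replace.go]
  | fuel + 1, [], acc, _ => by simp [PySem.Chars.replace.go]
  | fuel + 1, x :: t, acc, h => by
    have ht : t.length ≤ fuel := by simpa using h
    by_cases hc : c = x
    · subst hc
      simp [PySem.Chars.replace.go, List.isPrefixOf, uel_replace_go c fuel t acc ht]
    · have hne : (c == x) = false := by simp [hc]
      simp [PySem.Chars.replace.go, List.isPrefixOf, hne,
        uel_replace_go c fuel t (x :: acc) ht, Ne.symm hc]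

theorem uel_replace_singleton (c : Char) (l : List Char) :
    PySem.Chars.replace l [c] [] = l.filter (fun x => x != c) := by
  simpa [PySem.Chars.replace] using uel_replace_go c l.length l [] le_rfl

-- the common intermediate fold
def uelStep (u : List Char) (c : Char) : List Char :=
  if c ∈ uelLetters ∧ c ∉ u then u ++ [c] else u

theorem uel_loop_eq (ws : List Char) : ∀ (uniq : List Char),
    uelLoop ws (uelLetters.filter (fun x => !uniq.contains x)) uniq = ws.foldl uelStep uniq := by
  induction ws with
  | nil => intro uniq; rfl
  | cons c rest ih =>
    intro uniq
    have hmem : c ∈ uelLetters.filter (fun x => !uniq.contains x) ↔ (c ∈ uelLetters ∧ c ∉ uniq) := by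
      simp
    by_cases hc : c ∈ uelLetters ∧ c ∉ uniq
    · have hin : c ∈ uelLetters.filter (fun x => !uniq.contains x) := hmem.mpr hc
      have hfe : (uelLetters.filter (fun x => !uniq.contains x)).filter (fun x => x != c) =
          uelLetters.filter (fun x => !(uniq ++ [c]).contains x) := by
        rw [List.filter_filter]
        apply List.filter_congr
        intro x _
        by_cases hx : x = c <;> simp [hx]
      have hstep : uelStep uniq c = uniq ++ [c] := by simp [uelStep, hc]
      simp only [uelLoop, uel_isIn_singleton]
      rw [if_pos (by simpa using hin)]
      rw [uel_pyGetD_find c _ hin, uel_replace_singleton, hfe, ih (uniq ++ [c]),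
        List.foldl_cons, hstep]
    · have hnin : c ∉ uelLetters.filter (fun x => !uniq.contains x) := fun h => hc (hmem.mp h)
      have hstep : uelStep uniq c = uniq := by simp [uelStep, hc]
      simp only [uelLoop, uel_isIn_singleton]
      rw [if_neg (by simpa using hnin)]
      rw [ih uniq, List.foldl_cons, hstep]

theorem uel_filter_foldl_add (ws : List Char) : ∀ (s : List Char),
    (ws.foldl PySem.Set.add s).filter (fun x => decide (x ∈ uelLetters)) =
      ws.foldl uelStep (s.filter (fun x => decide (x ∈ uelLetters))) := by
  induction ws with
  | nil => intro s; rfl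
  | cons c rest ih =>
    intro s
    rw [List.foldl_cons, List.foldl_cons, ih]
    congr 1
    unfold PySem.Set.add uelStep
    by_cases hs : PySem.Set.contains s c = true
    · have hcs : c ∈ s := by simpa [PySem.Set.contains] using hs
      rw [if_pos hs]
      by_cases hl : c ∈ uelLetters
      · have : c ∈ s.filter (fun x => decide (x ∈ uelLetters)) := by simp [hcs, hl]
        rw [if_neg (by tauto)]
      · rw [if_neg (by tauto)]
    · have hcs : c ∉ s := by simpa [PySem.Set.contains] using hs
      rw [if_neg hs, List.filter_append]
      by_cases hl : c ∈ uelLetters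
      · have hni : c ∉ s.filter (fun x => decide (x ∈ uelLetters)) := by simp [hcs]
        rw [if_pos ⟨hl, hni⟩]
        simp [hl]
      · rw [if_neg (by tauto)]
        simp [hl]

set_option maxRecDepth 20000 in
theorem uelAltLetters_eq : uelAltLetters = uelLetters := by decide

-- ===== VERDICT (by name: the statement is the Claim_ definition above) =====
theorem unique_english_letters_spec : Claim_equal_unique_english_letters := by
  intro word _
  unfold Spec_unique_english_letters unique_english_letters unique_english_letters_alt
  have hA : uelLoop word.toList uelLetters [] = word.toList.foldl uelStep [] := by
    have := uel_loop_eq word.toList []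
    simpa using this
  have hB : PySem.Set.inter (PySem.Set.ofList word.toList) uelAltLetters =
      word.toList.foldl uelStep [] := by
    rw [uelAltLetters_eq]
    unfold PySem.Set.inter PySem.Set.ofList
    have : (fun x => PySem.Set.contains uelLetters x) = (fun x => decide (x ∈ uelLetters)) := by
      funext x; simp [PySem.Set.contains]
    rw [this]
    simpa [PySem.Set.empty] using uel_filter_foldl_add word.toList []
  rw [hA, hB]
  simp [PySem.List.len, PySem.Set.len]
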